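-- pv_equiv track=rewrite | github.com/sergeeey/ARCHCODE | scripts/analyze_positional_signal.py | category_label_breakdown
-- ===== SOURCE A (Python) =====
-- from collections import Counter, defaultdict
--
-- def category_label_breakdown(rows: list[dict]) -> dict:
--     """Report category x label breakdown, identify testable categories."""
--     counts = Counter()
--     for r in rows:
--         counts[(r["Category"], r["Label"])] += 1
--
--     categories = sorted(set(r["Category"] for r in rows))
--     breakdown = {}
--     for cat in categories:
--         n_path = counts.get((cat, "Pathogenic"), 0)
--         n_ben = counts.get((cat, "Benign"), 0)
--         breakdown[cat] = {"pathogenic": n_path, "benign": n_ben, "total": n_path + n_ben}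
--
--     return breakdown
-- ===== SOURCE B (Python) =====
-- def category_label_breakdown(rows: list[dict]) -> dict:
--     """Report category x label breakdown, identify testable categories."""
--     srows = sorted(rows, key=lambda r: r["Category"])
--     breakdown = {}
--     i, n = 0, len(srows)
--     while i < n:
--         cat = srows[i]["Category"]
--         p = b = 0
--         while i < n and srows[i]["Category"] == cat:
--             lab = srows[i]["Label"]
--             if lab == "Pathogenic":
--                 p += 1
--             elif lab == "Benign":
--                 b += 1
--             i += 1
--         breakdown[cat] = {"pathogenic": p, "benign": b, "total": p + b}
--     return breakdown
-- ===== Notes on version B (the rewrite author's own statement) =====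
-- stated objective: alternative
-- what changed: Sort-then-group-scan: B sorts the rows by Category once and emits each category's counts from one contiguous run with two index loops and no dictionary of counters, instead of A's flat (category,label) Counter plus a separate set-building pass.
import Mathlib
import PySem

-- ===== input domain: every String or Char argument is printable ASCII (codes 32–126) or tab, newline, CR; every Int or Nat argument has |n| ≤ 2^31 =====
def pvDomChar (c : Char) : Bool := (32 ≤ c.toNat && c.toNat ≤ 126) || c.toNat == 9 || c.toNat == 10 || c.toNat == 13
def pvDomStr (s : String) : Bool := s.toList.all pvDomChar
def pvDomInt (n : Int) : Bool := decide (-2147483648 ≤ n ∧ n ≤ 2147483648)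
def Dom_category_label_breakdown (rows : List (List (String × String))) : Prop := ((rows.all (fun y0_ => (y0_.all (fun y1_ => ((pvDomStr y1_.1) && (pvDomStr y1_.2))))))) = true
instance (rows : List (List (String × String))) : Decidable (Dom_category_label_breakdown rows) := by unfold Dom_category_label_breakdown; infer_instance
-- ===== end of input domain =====

-- B replaces A's flat (category,label) Counter + separate category-set pass by sort-then-group-scan:
-- sort the rows by Category once, then emit each category's counts from its contiguous run (objective: alternative).


-- r[k] for a row dict; total form of the lookup, only the Some branch is reached under Pre_
def pvRowGet (r : List (String × String)) (k : String) : String :=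
  ((PySem.Dict.mk r).get? k).getD ""

-- ===== PORT A =====
def category_label_breakdown (rows : List (List (String × String))) : List (String × List (String × Int)) :=
  -- counts = Counter(); for r in rows: counts[(r["Category"], r["Label"])] += 1
  let counts : PySem.Dict (String × String) Int :=
    rows.foldl (fun d r => d.modify (pvRowGet r "Category", pvRowGet r "Label") 0 (· + 1)) PySem.Dict.empty
  -- categories = sorted(set(r["Category"] for r in rows))
  let categories := PySem.List.sorted (PySem.Set.ofList (rows.map (fun r => pvRowGet r "Category"))) (fun x => x) false
  -- breakdown = {}; for cat in categories: breakdown[cat] = {...}; the inner dict literal has three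
  -- distinct literal keys, so it is written directly as its items list
  let breakdown : PySem.Dict String (List (String × Int)) :=
    categories.foldl (fun d cat =>
      let n_path := counts.getD (cat, "Pathogenic") 0
      let n_ben := counts.getD (cat, "Benign") 0
      d.insert cat [("pathogenic", n_path), ("benign", n_ben), ("total", n_path + n_ben)]) PySem.Dict.empty
  breakdown.items

-- ===== PORT B =====
-- the inner dict literal {"pathogenic": p, "benign": b, "total": p + b} as its items list
def pvPayload (pb : Int × Int) : List (String × Int) :=
  [("pathogenic", pb.1), ("benign", pb.2), ("total", pb.1 + pb.2)]

-- the inner while loop: count Pathogenic/Benign over one contiguous run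
def pvRunPB (run : List (List (String × String))) : Int × Int :=
  run.foldl (fun pb s =>
    let lab := pvRowGet s "Label"
    if lab = "Pathogenic" then (pb.1 + 1, pb.2)
    else if lab = "Benign" then (pb.1, pb.2 + 1)
    else pb) (0, 0)

-- the outer while loop over the sorted rows: one group per iteration (the index pair (i, run end)
-- of the Python while loops is the takeWhile/dropWhile split at the current position)
def pvScan : List (List (String × String)) → PySem.Dict String (List (String × Int)) → PySem.Dict String (List (String × Int))
  | [], d => d
  | r :: rest, d =>
      pvScan ((r :: rest).dropWhile (fun s => pvRowGet s "Category" == pvRowGet r "Category"))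
        (d.insert (pvRowGet r "Category")
          (pvPayload (pvRunPB ((r :: rest).takeWhile (fun s => pvRowGet s "Category" == pvRowGet r "Category")))))
  termination_by l _ => l.length
  decreasing_by
    simp only [List.dropWhile_cons, beq_self_eq_true, if_true]
    exact Nat.lt_succ_of_le (List.length_dropWhile_le _ _)

def category_label_breakdown_alt (rows : List (List (String × String))) : List (String × List (String × Int)) :=
  -- srows = sorted(rows, key=lambda r: r["Category"])
  (pvScan (PySem.List.sorted rows (fun r => pvRowGet r "Category") false) PySem.Dict.empty).items

-- ===== PRECONDITION & SPEC =====
-- Pre_ excludes exactly the rows missing a "Category" or "Label" key, on which Python A raises KeyError.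
def Pre_category_label_breakdown (rows : List (List (String × String))) : Prop :=
  ∀ r ∈ rows, (PySem.Dict.mk r).contains "Category" = true ∧ (PySem.Dict.mk r).contains "Label" = true
instance (rows : List (List (String × String))) : Decidable (Pre_category_label_breakdown rows) := by
  unfold Pre_category_label_breakdown; infer_instance

def pvWitness_category_label_breakdown : (List (List (String × String))) :=
  [[("Category", "splice"), ("Label", "Pathogenic")], [("Category", "missense"), ("Label", "VUS")]]

def Spec_category_label_breakdown (rows : List (List (String × String))) (out : List (String × List (String × Int))) : Prop := out = category_label_breakdown_alt rows
instance (rows : List (List (String × String))) (out : List (String × List (String × Int))) : Decidable (Spec_category_label_breakdown rows out) := by unfold Spec_category_label_breakdown; infer_instance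

-- ===== CLAIM (what is proved, stated in full; the proofs are below) =====
def Claim_equal_category_label_breakdown : Prop := ∀ (rows : List (List (String × String))), Dom_category_label_breakdown rows → Pre_category_label_breakdown rows → Spec_category_label_breakdown rows (category_label_breakdown rows)

-- ===== LEMMAS AND PROOFS =====

abbrev pvKey (r : List (String × String)) : String := pvRowGet r "Category"
abbrev pvLab (r : List (String × String)) : String := pvRowGet r "Label"

-- the per-category, per-label count over a row list
def pvCnt (l : List (List (String × String))) (c lab : String) : Nat :=
  l.countP (fun s => pvLab s == lab && pvKey s == c)

-- the distinct group heads the outer loop visits, in order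
def pvHeads : List (List (String × String)) → List String
  | [] => []
  | r :: rest => pvKey r :: pvHeads ((r :: rest).dropWhile (fun s => pvKey s == pvKey r))
  termination_by l => l.length
  decreasing_by
    simp only [List.dropWhile_cons, beq_self_eq_true, if_true]
    exact Nat.lt_succ_of_le (List.length_dropWhile_le _ _)

lemma pvRunPB_aux (l : List (List (String × String))) (p b : Int) :
    l.foldl (fun pb s =>
      let lab := pvRowGet s "Label"
      if lab = "Pathogenic" then (pb.1 + 1, pb.2)
      else if lab = "Benign" then (pb.1, pb.2 + 1)
      else pb) (p, b)
    = (p + (l.countP (fun s => pvLab s == "Pathogenic") : Int),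
       b + (l.countP (fun s => pvLab s == "Benign") : Int)) := by
  induction l generalizing p b with
  | nil => simp
  | cons a t ih =>
      simp only [List.foldl_cons, List.countP_cons]
      by_cases h1 : pvRowGet a "Label" = "Pathogenic"
      · simp [ih, h1, pvLab, Prod.ext_iff]
        ring
      · by_cases h2 : pvRowGet a "Label" = "Benign"
        · simp [ih, h2, pvLab, Prod.ext_iff]
          ring
        · simp [ih, h1, h2, pvLab]

lemma pvRunPB_eq (l : List (List (String × String))) :
    pvRunPB l = ((l.countP (fun s => pvLab s == "Pathogenic") : Int),
                 (l.countP (fun s => pvLab s == "Benign") : Int)) := by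
  simpa using pvRunPB_aux l 0 0

-- contiguity of a sorted run: takeWhile/dropWhile at the minimum key are filters
lemma pvSplit (c : String) (l : List (List (String × String)))
    (hp : (l.map pvKey).Pairwise (· ≤ ·)) (hall : ∀ x ∈ l, c ≤ pvKey x) :
    l.takeWhile (fun s => pvKey s == c) = l.filter (fun s => pvKey s == c)
    ∧ l.dropWhile (fun s => pvKey s == c) = l.filter (fun s => !(pvKey s == c)) := by
  induction l with
  | nil => simp
  | cons a t ih =>
      simp only [List.map_cons, List.pairwise_cons] at hp
      by_cases h : pvKey a = c
      · have := ih hp.2 (fun x hx => hall x (List.mem_cons_of_mem _ hx))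
        simp [h, this.1, this.2]
      · have hlt : c < pvKey a := lt_of_le_of_ne (hall a List.mem_cons_self) (Ne.symm h)
        have hne : ∀ x ∈ t, ¬ (pvKey x = c) := by
          intro x hx
          exact ne_of_gt (lt_of_lt_of_le hlt (hp.1 _ (List.mem_map_of_mem hx)))
        have ht1 : t.filter (fun s => pvKey s == c) = [] := by
          rw [List.filter_eq_nil_iff]; intro x hx; simpa using hne x hx
        have ht2 : t.filter (fun s => !(pvKey s == c)) = t := by
          rw [List.filter_eq_self]; intro x hx; simpa using hne x hx
        constructor
        · simp [h, ht1]
        · simp [h, ht2]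

lemma pvHeads_mem (l : List (List (String × String))) (c : String) (hc : c ∈ pvHeads l) :
    c ∈ l.map pvKey := by
  induction l using pvHeads.induct with
  | case1 => simp [pvHeads] at hc
  | case2 r rest ih =>
      rw [pvHeads] at hc
      rcases List.mem_cons.mp hc with h | h
      · simp [h]
      · have := ih h
        have hsub : ((r :: rest).dropWhile (fun s => pvKey s == pvKey r)).Sublist (r :: rest) :=
          List.dropWhile_sublist _
        exact (hsub.map pvKey).mem this

lemma pvHeads_complete (l : List (List (String × String)))
    (hp : (l.map pvKey).Pairwise (· ≤ ·)) :
    ∀ x ∈ l, pvKey x ∈ pvHeads l := by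
  induction l using pvHeads.induct with
  | case1 => simp
  | case2 r rest ih =>
      intro x hx
      have hall : ∀ y ∈ r :: rest, pvKey r ≤ pvKey y := by
        intro y hy
        rcases List.mem_cons.mp hy with h | h
        · simp [h]
        · simp only [List.map_cons, List.pairwise_cons] at hp
          exact hp.1 _ (List.mem_map_of_mem h)
      have hsplit := pvSplit (pvKey r) (r :: rest) hp hall
      rw [pvHeads]
      by_cases h : pvKey x = pvKey r
      · simp [h]
      · have hdp : (r :: rest).dropWhile (fun s => pvKey s == pvKey r) =
            (r :: rest).filter (fun s => !(pvKey s == pvKey r)) := hsplit.2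
        have hx' : x ∈ (r :: rest).dropWhile (fun s => pvKey s == pvKey r) := by
          rw [hdp, List.mem_filter]
          exact ⟨hx, by simp [h]⟩
        have hp' : (((r :: rest).dropWhile (fun s => pvKey s == pvKey r)).map pvKey).Pairwise (· ≤ ·) :=
          hp.sublist ((List.dropWhile_sublist _).map pvKey)
        exact List.mem_cons_of_mem _ (ih hp' x hx')

lemma pvHeads_pairwise (l : List (List (String × String)))
    (hp : (l.map pvKey).Pairwise (· ≤ ·)) :
    (pvHeads l).Pairwise (· < ·) := by
  induction l using pvHeads.induct with
  | case1 => simp [pvHeads]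
  | case2 r rest ih =>
      have hall : ∀ y ∈ r :: rest, pvKey r ≤ pvKey y := by
        intro y hy
        rcases List.mem_cons.mp hy with h | h
        · simp [h]
        · simp only [List.map_cons, List.pairwise_cons] at hp
          exact hp.1 _ (List.mem_map_of_mem h)
      have hsplit := pvSplit (pvKey r) (r :: rest) hp hall
      have hp' : (((r :: rest).dropWhile (fun s => pvKey s == pvKey r)).map pvKey).Pairwise (· ≤ ·) :=
        hp.sublist ((List.dropWhile_sublist _).map pvKey)
      rw [pvHeads]
      refine List.pairwise_cons.mpr ⟨?_, ih hp'⟩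
      intro c hc
      have := pvHeads_mem _ _ hc
      rcases List.mem_map.mp this with ⟨x, hx, rfl⟩
      rw [hsplit.2, List.mem_filter] at hx
      have h1 : pvKey r ≤ pvKey x := hall x hx.1
      have h2 : ¬ (pvKey x = pvKey r) := by simpa using hx.2
      exact lt_of_le_of_ne h1 (Ne.symm h2)

-- the main loop invariant: over key-sorted rows, pvScan appends one entry per distinct key,
-- carrying that key's counts over the whole list
lemma pvScan_items (l : List (List (String × String))) (d : PySem.Dict String (List (String × Int))) :
    (l.map pvKey).Pairwise (· ≤ ·) → d.keys.Nodup →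
    (∀ x ∈ l, d.contains (pvKey x) = false) →
    (pvScan l d).items = d.items ++ (pvHeads l).map (fun c =>
      (c, pvPayload ((pvCnt l c "Pathogenic" : Int), (pvCnt l c "Benign" : Int)))) := by
  induction l, d using pvScan.induct with
  | case1 d => intro _ _ _; simp [pvScan, pvHeads, pvCnt]
  | case2 r rest d ih =>
      intro hp hnd hfresh
      have hall : ∀ y ∈ r :: rest, pvKey r ≤ pvKey y := by
        intro y hy
        rcases List.mem_cons.mp hy with h | h
        · simp [h]
        · simp only [List.map_cons, List.pairwise_cons] at hp
          exact hp.1 _ (List.mem_map_of_mem h)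
      have hsplit := pvSplit (pvKey r) (r :: rest) hp hall
      have hp' : (((r :: rest).dropWhile (fun s => pvKey s == pvKey r)).map pvKey).Pairwise (· ≤ ·) :=
        hp.sublist ((List.dropWhile_sublist _).map pvKey)
      have hfr : d.contains (pvKey r) = false := hfresh r List.mem_cons_self
      have hmemdrop : ∀ x ∈ (r :: rest).dropWhile (fun s => pvKey s == pvKey r),
          x ∈ r :: rest ∧ pvKey x ≠ pvKey r := by
        intro x hx
        rw [hsplit.2, List.mem_filter] at hx
        exact ⟨hx.1, by simpa using hx.2⟩
      have hfresh' : ∀ x ∈ (r :: rest).dropWhile (fun s => pvKey s == pvKey r),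
          (d.insert (pvKey r) (pvPayload (pvRunPB ((r :: rest).takeWhile (fun s => pvKey s == pvKey r))))).contains (pvKey x) = false := by
        intro x hx
        rw [PySem.Dict.contains_insert]
        simp [(hmemdrop x hx).2, hfresh x (hmemdrop x hx).1]
      have hnd' := PySem.Dict.nodup_keys_insert d (pvKey r)
        (pvPayload (pvRunPB ((r :: rest).takeWhile (fun s => pvKey s == pvKey r)))) hnd
      have hkeyfun : (fun s => pvRowGet s "Category" == pvRowGet r "Category")
          = (fun s => pvKey s == pvKey r) := rfl
      rw [pvScan, pvHeads, hkeyfun]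
      rw [hkeyfun] at ih
      rw [ih hp' hnd' hfresh']
      rw [PySem.Dict.items_insert_of_not_contains _ _ hfr]
      rw [List.append_assoc]
      congr 1
      simp only [List.map_cons, List.singleton_append]
      -- head entry: the run's counts are the whole list's counts for this category
      have hrun : pvRunPB ((r :: rest).takeWhile (fun s => pvKey s == pvKey r))
          = ((pvCnt (r :: rest) (pvKey r) "Pathogenic" : Int), (pvCnt (r :: rest) (pvKey r) "Benign" : Int)) := by
        rw [hsplit.1, pvRunPB_eq]
        simp only [pvCnt, List.countP_filter]
      -- tail entries: counts are unchanged by dropping the run (its rows all carry this category)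
      have htail : ∀ c' ∈ pvHeads ((r :: rest).dropWhile (fun s => pvKey s == pvKey r)),
          ∀ lab, pvCnt ((r :: rest).dropWhile (fun s => pvKey s == pvKey r)) c' lab
            = pvCnt (r :: rest) c' lab := by
        intro c' hc' lab
        rcases List.mem_map.mp (pvHeads_mem _ _ hc') with ⟨x', hx', rfl⟩
        have hne : pvKey x' ≠ pvKey r := (hmemdrop x' hx').2
        have hzero : ((r :: rest).takeWhile (fun s => pvKey s == pvKey r)).countP
            (fun s => pvLab s == lab && pvKey s == pvKey x') = 0 := by
          rw [List.countP_eq_zero]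
          intro a ha
          rw [hsplit.1, List.mem_filter] at ha
          have : pvKey a = pvKey r := by simpa using ha.2
          simp [this, hne.symm]
        have := List.takeWhile_append_dropWhile (p := fun s => pvKey s == pvKey r) (l := r :: rest)
        calc pvCnt ((r :: rest).dropWhile (fun s => pvKey s == pvKey r)) (pvKey x') lab
            = 0 + pvCnt ((r :: rest).dropWhile (fun s => pvKey s == pvKey r)) (pvKey x') lab := by omega
          _ = pvCnt (r :: rest) (pvKey x') lab := by
              rw [← hzero, pvCnt, pvCnt, ← List.countP_append, this]
      rw [hrun]
      congr 1
      apply List.map_congr_left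
      intro c' hc'
      rw [htail c' hc' "Pathogenic", htail c' hc' "Benign"]

-- srows' per-category counts equal the (category,label)-pair counts over the original rows
lemma pvCnt_eq_count (rows : List (List (String × String))) (c lab : String) :
    ((pvCnt (PySem.List.sorted rows (fun r => pvRowGet r "Category") false) c lab : Int))
      = ((rows.map (fun r => (pvRowGet r "Category", pvRowGet r "Label"))).count (c, lab) : Int) := by
  have hperm : (PySem.List.sorted rows (fun r => pvRowGet r "Category") false).Perm rows :=
    PySem.List.sorted_perm _ _ _
  unfold pvCnt
  rw [hperm.countP_eq]
  rw [List.count_eq_countP, List.countP_map]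
  congr 1
  apply List.countP_congr
  intro r _
  rw [Bool.and_comm]
  rfl

-- ===== VERDICT (by name: the statement is the Claim_ definition above) =====
theorem category_label_breakdown_spec : Claim_equal_category_label_breakdown := by
  intro rows _ _
  unfold Spec_category_label_breakdown
  simp only [category_label_breakdown, category_label_breakdown_alt]
  set cats := rows.map (fun r => pvRowGet r "Category") with hcats
  set counts : PySem.Dict (String × String) Int :=
    rows.foldl (fun d r => d.modify (pvRowGet r "Category", pvRowGet r "Label") 0 (· + 1)) PySem.Dict.empty with hcounts
  set scats := PySem.List.sorted (PySem.Set.ofList cats) (fun x => x) false with hscats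
  set srows := PySem.List.sorted rows (fun r => pvRowGet r "Category") false with hsrows
  have hsltA : scats.Pairwise (· < ·) := PySem.List.sorted_ofList_pairwise_lt cats
  have hndA : (scats.map (fun c => c)).Nodup := by simpa using hsltA.nodup
  -- A's breakdown loop inserts fresh distinct keys, so its items list is the mapped category list
  rw [PySem.Dict.items_foldl_insert_fresh scats (fun c => c)
    (fun cat => [("pathogenic", counts.getD (cat, "Pathogenic") 0), ("benign", counts.getD (cat, "Benign") 0),
                 ("total", counts.getD (cat, "Pathogenic") 0 + counts.getD (cat, "Benign") 0)])
    PySem.Dict.empty (fun a _ => by simp) hndA]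
  -- B's group scan appends one entry per distinct key of the sorted rows
  have hpairw : (srows.map pvKey).Pairwise (· ≤ ·) :=
    PySem.List.sorted_map_key_pairwise rows (fun r => pvRowGet r "Category")
  rw [pvScan_items srows PySem.Dict.empty hpairw (by simp) (fun x _ => by simp)]
  simp only [show (PySem.Dict.empty : PySem.Dict String (List (String × Int))).items = [] from rfl, List.nil_append]
  -- the key lists agree: B's group heads are exactly sorted(set(categories))
  have hnodupH : (pvHeads srows).Nodup := (pvHeads_pairwise srows hpairw).nodup
  have hmemH : ∀ a, a ∈ pvHeads srows ↔ a ∈ PySem.Set.ofList cats := by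
    intro a
    rw [PySem.Set.mem_ofList]
    constructor
    · intro h
      rcases List.mem_map.mp (pvHeads_mem _ _ h) with ⟨x, hx, rfl⟩
      exact List.mem_map_of_mem ((PySem.List.mem_sorted _ _ _ _).mp hx)
    · intro h
      rcases List.mem_map.mp h with ⟨x, hx, rfl⟩
      exact pvHeads_complete srows hpairw x ((PySem.List.mem_sorted _ _ _ _).mpr hx)
  have hperm : (pvHeads srows).Perm (PySem.Set.ofList cats) :=
    (List.perm_ext_iff_of_nodup hnodupH (PySem.Set.nodup_ofList _)).mpr hmemH
  have hkeys : scats = pvHeads srows :=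
    PySem.List.sorted_eq_of_perm_of_pairwise_lt _ _ (fun x => x) hperm (pvHeads_pairwise srows hpairw)
  rw [hkeys]
  -- pointwise: A's Counter lookups equal B's run counts
  apply List.map_congr_left
  intro c _
  have hcount : ∀ lab, counts.getD (c, lab) 0
      = ((rows.map (fun r => (pvRowGet r "Category", pvRowGet r "Label"))).count (c, lab) : Int) := by
    intro lab
    have he : counts = (rows.map (fun r => (pvRowGet r "Category", pvRowGet r "Label"))).foldl
        (fun d x => d.modify x 0 (· + 1)) PySem.Dict.empty := by
      rw [hcounts, List.foldl_map]
    rw [he, PySem.Dict.getD_foldl_modify_add_one]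
    simp
  have hc : ∀ lab, (pvCnt srows c lab : Nat)
      = (rows.map (fun r => (pvRowGet r "Category", pvRowGet r "Label"))).count (c, lab) := by
    intro lab
    have h := pvCnt_eq_count rows c lab
    rw [← hsrows] at h
    exact_mod_cast h
  simp [pvPayload, hcount, hc]
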